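-- pv_equiv track=rewrite | github.com/moconan7/Smart-Traffic-Light-Controller | ai traffic light system final final (1).py | dfs_limited
-- ===== SOURCE A (Python) =====
-- def cost(state):
--     n, s, e, w, phase, tp = state
--     return n + s + e + w
--
-- def transition_for_planning(state, action, min_green_time=3):
--     n, s, e, w, phase, tp = state
--
--     n = n + 1
--     s = s + 1
--     e = e + 1
--     w = w + 1
--
--     if action == "HOLD":
--         new_phase = phase
--         new_tp = tp + 1
--     else:
--         if tp >= min_green_time:
--             new_phase = "EW" if phase == "NS" else "NS"
--             new_tp = 0
--         else:
--             new_phase = phase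
--             new_tp = tp + 1
--
--     if new_phase == "NS":
--         n = max(0, n - 2)
--         s = max(0, s - 2)
--     else:
--         e = max(0, e - 2)
--         w = max(0, w - 2)
--
--     return (n, s, e, w, new_phase, new_tp)
--
-- def dfs_limited(start_state, depth_limit):
--     visited = []
--     stack = [[(start_state, None)]]
--
--     best_action = "HOLD"
--     best_cost = float('inf')
--
--     while stack:
--         path = stack.pop()
--         state, _ = path[-1]
--
--         if state in visited:
--             continue
--         visited.append(state)
--
--         if len(path) - 1 == depth_limit:
--             state_cost = cost(state)
--             if state_cost < best_cost:
--                 best_cost = state_cost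
--                 best_action = path[1][1] if len(path) > 1 else "HOLD"
--             continue
--
--         for action in ["HOLD", "SWITCH"]:
--             next_state = transition_for_planning(state, action)
--             new_path = path.copy()
--             new_path.append((next_state, action))
--             stack.append(new_path)
--
--     return best_action
-- ===== SOURCE B (Python) =====
-- def cost(state):
--     n, s, e, w, phase, tp = state
--     return n + s + e + w
--
-- def transition_for_planning(state, action, min_green_time=3):
--     n, s, e, w, phase, tp = state
--     n = n + 1
--     s = s + 1
--     e = e + 1
--     w = w + 1
--     if action == "HOLD":
--         new_phase = phase
--         new_tp = tp + 1
--     else: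
--         if tp >= min_green_time:
--             new_phase = "EW" if phase == "NS" else "NS"
--             new_tp = 0
--         else:
--             new_phase = phase
--             new_tp = tp + 1
--     if new_phase == "NS":
--         n = max(0, n - 2)
--         s = max(0, s - 2)
--     else:
--         e = max(0, e - 2)
--         w = max(0, w - 2)
--     return (n, s, e, w, new_phase, new_tp)
--
-- def dfs_limited(start_state, depth_limit):
--     visited = set()
--     best = ["HOLD", None]  # None means +infinity
--
--     def recurse(state, depth, first_action):
--         if state in visited:
--             return
--         visited.add(state)
--         if depth == depth_limit:
--             c = cost(state)
--             if best[1] is None or c < best[1]: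
--                 best[1] = c
--                 best[0] = first_action
--             return
--         # SWITCH first: matches the LIFO order of an explicit stack
--         for action in ("SWITCH", "HOLD"):
--             nxt = transition_for_planning(state, action)
--             recurse(nxt, depth + 1, action if depth == 0 else first_action)
--
--     recurse(start_state, 0, "HOLD")
--     return best[0]
-- ===== Notes on version B (the rewrite author's own statement) =====
-- stated objective: alternative
-- what changed: Replaces A's explicit stack of copied paths (with a visited list scanned for membership) by a recursive depth-first helper that threads a shared visited set and (best_cost, first_action) state, visiting SWITCH before HOLD to preserve A's LIFO traversal order.
import Mathlib
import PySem

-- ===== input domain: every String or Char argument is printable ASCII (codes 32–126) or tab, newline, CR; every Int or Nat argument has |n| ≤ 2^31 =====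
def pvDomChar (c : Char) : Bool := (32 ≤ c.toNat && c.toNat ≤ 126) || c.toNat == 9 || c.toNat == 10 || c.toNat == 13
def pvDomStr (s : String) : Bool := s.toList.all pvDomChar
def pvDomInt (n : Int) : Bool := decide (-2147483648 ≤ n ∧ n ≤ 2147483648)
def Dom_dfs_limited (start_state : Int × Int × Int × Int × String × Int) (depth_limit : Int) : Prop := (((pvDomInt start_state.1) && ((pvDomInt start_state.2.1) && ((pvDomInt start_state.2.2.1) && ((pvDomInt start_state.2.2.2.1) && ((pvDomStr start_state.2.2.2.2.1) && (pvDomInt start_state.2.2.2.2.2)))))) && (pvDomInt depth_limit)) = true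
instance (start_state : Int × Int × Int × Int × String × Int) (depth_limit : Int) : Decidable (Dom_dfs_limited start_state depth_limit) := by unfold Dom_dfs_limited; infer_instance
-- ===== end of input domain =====

-- B replaces A's explicit stack of copied paths (and its visited list scanned for membership)
-- by a recursive DFS with a shared visited set and threaded best state; return values agree
-- for every depth_limit ≥ 0 (A never terminates for negative depth_limit).

-- ===== PORT A =====
-- shared module helper: cost(state)
def pvCost (st : Int × Int × Int × Int × String × Int) : Int :=
  st.1 + st.2.1 + st.2.2.1 + st.2.2.2.1

-- shared module helper: transition_for_planning(state, action) with min_green_time = 3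
def pvTransition (st : Int × Int × Int × Int × String × Int) (action : String) :
    Int × Int × Int × Int × String × Int :=
  match st with
  | (n, s, e, w, phase, tp) =>
    let n := n + 1
    let s := s + 1
    let e := e + 1
    let w := w + 1
    let pt : String × Int :=
      if action = "HOLD" then (phase, tp + 1)
      else if tp ≥ 3 then ((if phase = "NS" then "EW" else "NS"), 0)
      else (phase, tp + 1)
    if pt.1 = "NS" then (max 0 (n - 2), max 0 (s - 2), e, w, pt.1, pt.2)
    else (n, s, max 0 (e - 2), max 0 (w - 2), pt.1, pt.2)

-- `state_cost < best_cost` where `none` plays float('inf')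
def pvLt (c : Int) (bc : Option Int) : Bool :=
  match bc with
  | none => true
  | some b => c < b

-- path[-1][0] (paths are always nonempty)
def pvLastSt (path : List ((Int × Int × Int × Int × String × Int) × Option String)) :
    Int × Int × Int × Int × String × Int :=
  (path.getLastD ((0, 0, 0, 0, "", 0), none)).1

-- `path[1][1] if len(path) > 1 else "HOLD"` (the action slot of path[0] is None)
def pvFirstAct (path : List ((Int × Int × Int × Int × String × Int) × Option String)) : String :=
  match path with
  | _ :: (_, some a) :: _ => a
  | _ => "HOLD"

-- A's while-loop over the stack; head of the list = top of the stack; `none` = fuel exhausted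
-- (the fuel is a totality guard only: 2^(depth_limit+1) pops always suffice, see the proofs)
def pvLoopA : Nat → List (List ((Int × Int × Int × Int × String × Int) × Option String)) →
    List (Int × Int × Int × Int × String × Int) → String → Option Int → Int → Option String
  | _, [], _, ba, _, _ => some ba
  | 0, _ :: _, _, _, _, _ => none
  | fuel + 1, path :: rest, visited, ba, bc, dl =>
    let state := pvLastSt path
    if state ∈ visited then pvLoopA fuel rest visited ba bc dl
    else
      let visited' := visited ++ [state]
      if (path.length : Int) - 1 = dl then
        if pvLt (pvCost state) bc then
          pvLoopA fuel rest visited' (pvFirstAct path) (some (pvCost state)) dl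
        else pvLoopA fuel rest visited' ba bc dl
      else
        pvLoopA fuel
          ((path ++ [(pvTransition state "SWITCH", some "SWITCH")]) ::
            (path ++ [(pvTransition state "HOLD", some "HOLD")]) :: rest)
          visited' ba bc dl

def dfs_limited (start_state : Int × Int × Int × Int × String × Int) (depth_limit : Int) : String :=
  (pvLoopA (2 ^ (depth_limit.toNat + 1)) [[(start_state, none)]] [] "HOLD" none depth_limit).getD "HOLD"

-- ===== PORT B =====
-- B's inner helper `recurse(state, depth, first_action)`, threading (visited, best);
-- the fuel (= remaining depth budget) is a totality guard only: it never runs out for depth_limit ≥ 0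
def pvRecB : Nat → (Int × Int × Int × Int × String × Int) → Int → Int → String →
    PySem.Set (Int × Int × Int × Int × String × Int) → String × Option Int →
    PySem.Set (Int × Int × Int × Int × String × Int) × (String × Option Int)
  | fuel, state, depth, dl, first, visited, best =>
    if PySem.Set.contains visited state then (visited, best)
    else
      let visited' := PySem.Set.add visited state
      if depth = dl then
        if pvLt (pvCost state) best.2 then (visited', (first, some (pvCost state)))
        else (visited', best)
      else
        match fuel with
        | 0 => (visited', best)
        | fuel + 1 =>
          let r1 := pvRecB fuel (pvTransition state "SWITCH") (depth + 1) dl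
            (if depth = 0 then "SWITCH" else first) visited' best
          pvRecB fuel (pvTransition state "HOLD") (depth + 1) dl
            (if depth = 0 then "HOLD" else first) r1.1 r1.2

def dfs_limited_alt (start_state : Int × Int × Int × Int × String × Int) (depth_limit : Int) : String :=
  (pvRecB depth_limit.toNat start_state 0 depth_limit "HOLD" PySem.Set.empty ("HOLD", none)).2.1

-- ===== PRECONDITION & SPEC =====
-- A diverges (its stack never empties) whenever depth_limit < 0; those inputs are excluded.
def Pre_dfs_limited (start_state : Int × Int × Int × Int × String × Int) (depth_limit : Int) : Prop :=
  0 ≤ depth_limit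
instance (start_state : Int × Int × Int × Int × String × Int) (depth_limit : Int) : Decidable (Pre_dfs_limited start_state depth_limit) := by unfold Pre_dfs_limited; infer_instance

def pvWitness_dfs_limited : (Int × Int × Int × Int × String × Int) × Int := ((3, 2, 5, 1, "NS", 0), 3)

def Spec_dfs_limited (start_state : Int × Int × Int × Int × String × Int) (depth_limit : Int) (out : String) : Prop := out = dfs_limited_alt start_state depth_limit
instance (start_state : Int × Int × Int × Int × String × Int) (depth_limit : Int) (out : String) : Decidable (Spec_dfs_limited start_state depth_limit out) := by unfold Spec_dfs_limited; infer_instance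

-- ===== CLAIM (what is proved, stated in full; the proofs are below) =====
def Claim_equal_dfs_limited : Prop := ∀ (start_state : Int × Int × Int × Int × String × Int) (depth_limit : Int), Dom_dfs_limited start_state depth_limit → Pre_dfs_limited start_state depth_limit → Spec_dfs_limited start_state depth_limit (dfs_limited start_state depth_limit)

-- ===== LEMMAS AND PROOFS =====

theorem pvLastSt_concat (path : List ((Int × Int × Int × Int × String × Int) × Option String))
    (z : (Int × Int × Int × Int × String × Int) × Option String) :
    pvLastSt (path ++ [z]) = z.1 := by
  simp [pvLastSt]

theorem pvFirstAct_concat (path : List ((Int × Int × Int × Int × String × Int) × Option String))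
    (hne : path ≠ []) (z : (Int × Int × Int × Int × String × Int) × Option String) :
    pvFirstAct (path ++ [z]) =
      if path.length = 1 then (match z.2 with | some a => a | none => "HOLD") else pvFirstAct path := by
  match path with
  | [] => exact absurd rfl hne
  | [x] => rcases z with ⟨zs, _ | za⟩ <;> simp [pvFirstAct]
  | x :: (s2, o2) :: t => cases o2 <;> simp [pvFirstAct]

-- fuel monotonicity of the stack loop
theorem pvLoopA_mono (f : Nat) : ∀ (s : List (List ((Int × Int × Int × Int × String × Int) × Option String)))
    (v : List (Int × Int × Int × Int × String × Int)) (ba : String) (bc : Option Int) (dl : Int) (r : String),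
    pvLoopA f s v ba bc dl = some r → pvLoopA (f + 1) s v ba bc dl = some r := by
  induction f with
  | zero =>
    intro s v ba bc dl r h
    cases s with
    | nil => simpa [pvLoopA] using h
    | cons p rest => simp [pvLoopA] at h
  | succ f ih =>
    intro s v ba bc dl r h
    cases s with
    | nil => simpa [pvLoopA] using h
    | cons p rest =>
      rw [pvLoopA] at h ⊢
      dsimp only at h ⊢
      split_ifs at h ⊢ <;> exact ih _ _ _ _ _ _ h

theorem pvLoopA_mono_le {f f' : Nat} (h : f ≤ f') : ∀ {s v ba bc dl r},
    pvLoopA f s v ba bc dl = some r → pvLoopA f' s v ba bc dl = some r := by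
  induction h with
  | refl => intro _ _ _ _ _ _ h; exact h
  | step _ ih => intro _ _ _ _ _ _ h; exact pvLoopA_mono _ _ _ _ _ _ _ (ih h)

-- processing the top path of the stack = one call of B's recursion, then the rest of the stack
theorem pvBridge (k : Nat) : ∀ (dl : Int)
    (path : List ((Int × Int × Int × Int × String × Int) × Option String))
    (rest : List (List ((Int × Int × Int × Int × String × Int) × Option String)))
    (v : List (Int × Int × Int × Int × String × Int)) (ba : String) (bc : Option Int) (fr : Nat) (r : String),
    path ≠ [] → (path.length : Int) - 1 + (k : Int) = dl →
    pvLoopA fr rest (pvRecB k (pvLastSt path) ((path.length : Int) - 1) dl (pvFirstAct path) v (ba, bc)).1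
      (pvRecB k (pvLastSt path) ((path.length : Int) - 1) dl (pvFirstAct path) v (ba, bc)).2.1
      (pvRecB k (pvLastSt path) ((path.length : Int) - 1) dl (pvFirstAct path) v (ba, bc)).2.2 dl = some r →
    pvLoopA (2 ^ (k + 1) - 1 + fr) (path :: rest) v ba bc dl = some r := by
  induction k with
  | zero =>
    intro dl path rest v ba bc fr r hne hlen h
    have hfuel : 2 ^ (0 + 1) - 1 + fr = fr + 1 := by norm_num [Nat.add_comm]
    have hdl : (path.length : Int) - 1 = dl := by push_cast at hlen; omega
    rw [hfuel, pvLoopA]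
    by_cases hv : pvLastSt path ∈ v
    · have hc : PySem.Set.contains v (pvLastSt path) = true := (PySem.Set.contains_iff _ _).mpr hv
      rw [pvRecB] at h
      simp only [hc, if_true] at h
      simp only [if_pos hv]
      exact h
    · have hc : PySem.Set.contains v (pvLastSt path) = false := by
        simp [Bool.eq_false_iff]; exact hv
      rw [pvRecB] at h
      simp only [hc, Bool.false_eq_true, if_false, hdl, PySem.Set.add, if_false] at h
      simp only [if_neg hv, if_pos hdl]
      by_cases hlt : pvLt (pvCost (pvLastSt path)) bc = true
      · simp only [hlt, if_true] at h ⊢; exact h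
      · simp only [Bool.not_eq_true] at hlt
        simp only [hlt, Bool.false_eq_true, if_false] at h ⊢; exact h
  | succ k ih =>
    intro dl path rest v ba bc fr r hne hlen h
    have h1 : (1 : Nat) ≤ 2 ^ (k + 1) := Nat.one_le_two_pow
    have hfuel : 2 ^ (k + 1 + 1) - 1 + fr = ((2 ^ (k + 1) - 1) + ((2 ^ (k + 1) - 1) + fr)) + 1 := by
      have h2 : 2 ^ (k + 1 + 1) = 2 ^ (k + 1) * 2 := pow_succ 2 (k + 1)
      omega
    have hdl : ¬ ((path.length : Int) - 1 = dl) := by push_cast at hlen; omega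
    rw [hfuel, pvLoopA]
    by_cases hv : pvLastSt path ∈ v
    · have hc : PySem.Set.contains v (pvLastSt path) = true := (PySem.Set.contains_iff _ _).mpr hv
      rw [pvRecB] at h
      simp only [hc, if_true] at h
      simp only [if_pos hv]
      exact pvLoopA_mono_le (by omega) h
    · have hc : PySem.Set.contains v (pvLastSt path) = false := by
        simp [Bool.eq_false_iff]; exact hv
      have hlen1 : 1 ≤ path.length := List.length_pos_iff.mpr hne
      rw [pvRecB] at h
      simp only [hc, Bool.false_eq_true, if_false, if_neg hdl, PySem.Set.add] at h
      simp only [if_neg hv, if_neg hdl]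
      apply ih dl (path ++ [(pvTransition (pvLastSt path) "SWITCH", some "SWITCH")])
        _ _ ba bc _ r (by simp) (by push_cast at hlen ⊢; simp; omega)
      simp only [pvLastSt_concat, pvFirstAct_concat _ hne, List.length_append,
        List.length_cons, List.length_nil, Nat.cast_add, Nat.cast_one, Nat.cast_zero]
      apply ih dl (path ++ [(pvTransition (pvLastSt path) "HOLD", some "HOLD")])
        rest _ _ _ fr r (by simp) (by push_cast at hlen ⊢; simp; omega)
      simp only [pvLastSt_concat, pvFirstAct_concat _ hne, List.length_append,
        List.length_cons, List.length_nil, Nat.cast_add, Nat.cast_one, Nat.cast_zero]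
      have harith : (path.length : Int) + (0 + 1) - 1 = (path.length : Int) - 1 + 1 := by omega
      rw [harith] -- may fail if shape differs; adjust
      by_cases h1l : path.length = 1
      · have hz : (path.length : Int) - 1 = 0 := by omega
        simp only [h1l, Prod.mk.eta] at h ⊢
        exact h
      · have hz : ¬ ((path.length : Int) - 1 = 0) := by omega
        simp only [if_neg h1l, if_neg hz, Prod.mk.eta] at h ⊢
        exact h

-- ===== VERDICT (by name: the statement is the Claim_ definition above) =====
theorem dfs_limited_spec : Claim_equal_dfs_limited := by
  intro st dl _hdom hpre
  show dfs_limited st dl = dfs_limited_alt st dl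
  have hk : ((dl.toNat : Int)) = dl := Int.toNat_of_nonneg hpre
  have hb := pvBridge dl.toNat dl [(st, none)] [] [] "HOLD" none 1
    ((pvRecB dl.toNat st 0 dl "HOLD" [] ("HOLD", none)).2.1)
    (by simp) (by simp [hk]) ?_
  · have h2 : 2 ^ (dl.toNat + 1) - 1 + 1 = 2 ^ (dl.toNat + 1) :=
      Nat.sub_add_cancel Nat.one_le_two_pow
    rw [h2] at hb
    unfold dfs_limited dfs_limited_alt
    rw [hb]
    rfl
  · simp [pvLoopA, pvLastSt, pvFirstAct]
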